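-- pv_equiv track=rewrite | github.com/nidinnover-hash/Team-Empire-BOS- | app/memory/retrieval.py | trim_context_to_limit
-- ===== SOURCE A (Python) =====
-- DEFAULT_CONTEXT_CHAR_LIMIT = 4_000
--
-- def trim_context_to_limit(
--     context: str,
--     char_limit: int = DEFAULT_CONTEXT_CHAR_LIMIT,
-- ) -> str:
--     """
--     Trim a pre-built memory context string to at most char_limit characters.
--     Trimming is done on whole lines to avoid cutting mid-sentence.
--     Appends a notice so the AI knows context was truncated.
--     """
--     if len(context) <= char_limit:
--         return context
--
--     lines = context.splitlines(keepends=True)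
--     result: list[str] = []
--     total = 0
--     for line in lines:
--         if total + len(line) > char_limit:
--             break
--         result.append(line)
--         total += len(line)
--
--     return "".join(result) + "\n[... memory truncated for length ...]\n"
-- ===== SOURCE B (Python) =====
-- DEFAULT_CONTEXT_CHAR_LIMIT = 4_000
--
-- def trim_context_to_limit(context, char_limit=DEFAULT_CONTEXT_CHAR_LIMIT):
--     # Single character scan: find the last line-boundary position <= char_limit,
--     # then slice the string there.  No line list is built and nothing is joined.
--     if len(context) <= char_limit:
--         return context
--     n = len(context)
--     cut = 0
--     i = 0
--     while i < n:
--         c = context[i]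
--         if c == '\n':
--             j = i + 1
--         elif c == '\r':
--             j = i + 2 if i + 1 < n and context[i + 1] == '\n' else i + 1
--         else:
--             i += 1
--             continue
--         if j <= char_limit:
--             cut = j
--             i = j
--         else:
--             break
--     return context[:cut] + "\n[... memory truncated for length ...]\n"
-- ===== Notes on version B (the rewrite author's own statement) =====
-- stated objective: simpler
-- what changed: B replaces A's splitlines(keepends=True) + accumulating line loop + join with a single character scan that records the last line-boundary position fitting in char_limit and then slices the original string there.
import Mathlib
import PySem

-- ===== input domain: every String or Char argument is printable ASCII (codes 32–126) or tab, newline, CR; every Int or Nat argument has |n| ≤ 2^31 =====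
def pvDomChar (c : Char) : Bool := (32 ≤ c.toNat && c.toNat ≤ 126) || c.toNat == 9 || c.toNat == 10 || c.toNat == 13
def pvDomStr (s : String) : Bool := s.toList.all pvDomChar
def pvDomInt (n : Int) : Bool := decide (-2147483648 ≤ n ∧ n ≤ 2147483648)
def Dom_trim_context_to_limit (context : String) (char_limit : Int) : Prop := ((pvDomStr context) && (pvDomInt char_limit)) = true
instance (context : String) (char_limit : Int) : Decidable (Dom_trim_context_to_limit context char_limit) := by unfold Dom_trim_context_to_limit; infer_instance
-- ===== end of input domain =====

-- B trims in ONE character scan that finds the last line-boundary position ≤ char_limit and slices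
-- the string there, instead of A's split-into-lines / accumulating loop / join; objective: simpler.

-- ===== PORT A =====
-- context.splitlines(keepends=True), ported by hand (exact on the Dom_ character set, where the
-- only line breaks are '\n', '\r' and '\r\n'); cur is the reversed portion of the current line.
def pvSplitKeepAux (cur : List Char) : List Char → List (List Char)
  | [] => if cur = [] then [] else [cur.reverse]
  | '\n' :: rest => (cur.reverse ++ ['\n']) :: pvSplitKeepAux [] rest
  | '\r' :: '\n' :: rest => (cur.reverse ++ ['\r', '\n']) :: pvSplitKeepAux [] rest
  | '\r' :: rest => (cur.reverse ++ ['\r']) :: pvSplitKeepAux [] rest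
  | c :: rest => pvSplitKeepAux (c :: cur) rest

-- A's for-loop with its break: keep each line while total + len(line) ≤ char_limit.
def pvTakeLines (limit total : Int) : List (List Char) → List (List Char)
  | [] => []
  | l :: ls => if total + (l.length : Int) > limit then [] else l :: pvTakeLines limit (total + (l.length : Int)) ls

def pvNotice : List Char := "\n[... memory truncated for length ...]\n".toList

def trim_context_to_limit (context : String) (char_limit : Int) : String :=
  if (PySem.Str.len context : Int) ≤ char_limit then context
  else
    String.ofList (PySem.Chars.join [] (pvTakeLines char_limit 0 (pvSplitKeepAux [] context.toList)) ++ pvNotice)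

-- ===== PORT B =====
-- B's while-loop: i is the current position, cut the last line-end position found ≤ char_limit.
def pvCutAt (limit : Int) (i cut : Nat) : List Char → Nat
  | [] => cut
  | '\n' :: rest => if ((i + 1 : Nat) : Int) ≤ limit then pvCutAt limit (i + 1) (i + 1) rest else cut
  | '\r' :: '\n' :: rest => if ((i + 2 : Nat) : Int) ≤ limit then pvCutAt limit (i + 2) (i + 2) rest else cut
  | '\r' :: rest => if ((i + 1 : Nat) : Int) ≤ limit then pvCutAt limit (i + 1) (i + 1) rest else cut
  | _ :: rest => pvCutAt limit (i + 1) cut rest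

-- context[:cut] = List.take cut (exact here: 0 ≤ cut ≤ len(context)).
def trim_context_to_limit_alt (context : String) (char_limit : Int) : String :=
  if (PySem.Str.len context : Int) ≤ char_limit then context
  else String.ofList (context.toList.take (pvCutAt char_limit 0 0 context.toList) ++ pvNotice)

-- ===== PRECONDITION & SPEC =====
def Spec_trim_context_to_limit (context : String) (char_limit : Int) (out : String) : Prop := out = trim_context_to_limit_alt context char_limit
instance (context : String) (char_limit : Int) (out : String) : Decidable (Spec_trim_context_to_limit context char_limit out) := by unfold Spec_trim_context_to_limit; infer_instance

-- ===== CLAIM (what is proved, stated in full; the proofs are below) =====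
def Claim_equal_trim_context_to_limit : Prop := ∀ (context : String) (char_limit : Int), Dom_trim_context_to_limit context char_limit → Spec_trim_context_to_limit context char_limit (trim_context_to_limit context char_limit)

-- ===== LEMMAS AND PROOFS =====

theorem pv_join_nil_flatten (ls : List (List Char)) : PySem.Chars.join [] ls = ls.flatten := by
  induction ls with
  | nil => rfl
  | cons x t ih =>
    cases t with
    | nil => simp [PySem.Chars.join, List.intercalate]
    | cons y t' => simp_all [PySem.Chars.join, List.intercalate, List.intersperse]

-- B's cut never moves backwards (cut ≤ i is the loop invariant)
theorem pv_cut_le (limit : Int) : ∀ (n : Nat) (cs : List Char), cs.length ≤ n → ∀ (i cut : Nat), cut ≤ i → cut ≤ pvCutAt limit i cut cs := by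
  intro n
  induction n with
  | zero =>
    intro cs hle i cut hci
    have hcs : cs = [] := List.length_eq_zero_iff.mp (Nat.le_zero.mp hle)
    subst hcs; simp [pvCutAt]
  | succ n ih =>
    intro cs hle i cut hci
    rcases cs with _ | ⟨c, rest⟩
    · simp [pvCutAt]
    · by_cases hn : c = '\n'
      · subst hn
        simp only [pvCutAt]
        split_ifs with h
        · exact Nat.le_trans (by omega) (ih rest (by simp at hle ⊢; omega) (i+1) (i+1) (le_refl _))
        · exact le_refl _
      · by_cases hr : c = '\r'
        · subst hr
          rcases rest with _ | ⟨c2, rest'⟩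
          · simp only [pvCutAt]
            split_ifs with h
            · omega
            · exact le_refl _
          · by_cases h2 : c2 = '\n'
            · subst h2
              simp only [pvCutAt]
              split_ifs with h
              · exact Nat.le_trans (by omega) (ih rest' (by simp at hle ⊢; omega) (i+2) (i+2) (le_refl _))
              · exact le_refl _
            · rw [show pvCutAt limit i cut ('\r' :: c2 :: rest') =
                    if ((i + 1 : Nat) : Int) ≤ limit then pvCutAt limit (i + 1) (i + 1) (c2 :: rest') else cut from by
                  simp [pvCutAt, h2]]
              split_ifs with h
              · exact Nat.le_trans (by omega) (ih (c2 :: rest') (by simp at hle ⊢; omega) (i+1) (i+1) (le_refl _))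
              · exact le_refl _
        · rw [show pvCutAt limit i cut (c :: rest) = pvCutAt limit (i + 1) cut rest from by
              simp [pvCutAt, hr]]
          exact ih rest (by simp at hle ⊢; omega) (i+1) cut (by omega)

-- the central invariant: A's joined kept lines are exactly the prefix up to B's boundary
theorem pv_main (limit : Int) : ∀ (n : Nat) (cs cur : List Char) (cut : Nat),
    cs.length ≤ n →
    limit < ((cut + cur.length + cs.length : Nat) : Int) →
    (pvTakeLines limit (cut : Int) (pvSplitKeepAux cur cs)).flatten
      = (cur.reverse ++ cs).take (pvCutAt limit (cut + cur.length) cut cs - cut) := by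
  intro n
  induction n with
  | zero =>
    intro cs cur cut hle hlim
    have hcs : cs = [] := List.length_eq_zero_iff.mp (Nat.le_zero.mp hle)
    subst hcs
    simp only [pvSplitKeepAux, pvCutAt, Nat.sub_self, List.take_zero]
    split_ifs with h
    · simp [pvTakeLines]
    · simp only [pvTakeLines]
      rw [if_pos (by simp at hlim ⊢; omega)]
      simp
  | succ n ih =>
    intro cs cur cut hle hlim
    rcases cs with _ | ⟨c, rest⟩
    · simp only [pvSplitKeepAux, pvCutAt, Nat.sub_self, List.take_zero]
      split_ifs with h
      · simp [pvTakeLines]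
      · simp only [pvTakeLines]
        rw [if_pos (by simp at hlim ⊢; omega)]
        simp
    · by_cases hn : c = '\n'
      · subst hn
        simp only [pvSplitKeepAux, pvCutAt, pvTakeLines]
        split_ifs with hA hB hB
        · -- line too long for A, yet boundary fits for B: impossible
          exfalso; simp at hA hB; omega
        · simp
        · -- both keep the line
          have hIH := ih rest [] (cut + cur.length + 1) (by simpa using hle)
            (by simp at hlim ⊢; omega)
          simp only [List.length_nil, Nat.add_zero, List.reverse_nil, List.nil_append] at hIH
          rw [show ((cut : Int) + ((cur.reverse ++ ['\n']).length : Int)) = ((cut + cur.length + 1 : Nat) : Int) from by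
              simp; omega]
          rw [List.flatten_cons, hIH]
          have hK := pv_cut_le limit rest.length rest (le_refl _) (cut + cur.length + 1) (cut + cur.length + 1) (le_refl _)
          rw [show cur.reverse ++ '\n' :: rest = (cur.reverse ++ ['\n']) ++ rest from by simp]
          rw [show pvCutAt limit (cut + cur.length + 1) (cut + cur.length + 1) rest - cut
                = (cur.reverse ++ ['\n']).length + (pvCutAt limit (cut + cur.length + 1) (cut + cur.length + 1) rest - (cut + cur.length + 1)) from by
              simp; omega]
          rw [List.take_append]
          simp [List.take_of_length_le]
        · exfalso; simp at hA hB; omega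
      · by_cases hr : c = '\r'
        · subst hr
          rcases rest with _ | ⟨c2, rest'⟩
          · -- final line is "\r"
            simp only [pvSplitKeepAux, pvCutAt, pvTakeLines]
            split_ifs with hA hB hB
            · exfalso; simp at hA hB; omega
            · simp
            · simp [pvTakeLines, show cut + cur.length + 1 - cut = cur.length + 1 from by omega,
                List.take_of_length_le]
            · exfalso; simp at hA hB; omega
          · by_cases h2 : c2 = '\n'
            · subst h2
              simp only [pvSplitKeepAux, pvCutAt, pvTakeLines]
              split_ifs with hA hB hB
              · exfalso; simp at hA hB; omega
              · simp
              · have hIH := ih rest' [] (cut + cur.length + 2) (by simp at hle ⊢; omega)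
                  (by simp at hlim ⊢; omega)
                simp only [List.length_nil, Nat.add_zero, List.reverse_nil, List.nil_append] at hIH
                rw [show ((cut : Int) + ((cur.reverse ++ ['\r', '\n']).length : Int)) = ((cut + cur.length + 2 : Nat) : Int) from by
                    simp; omega]
                rw [List.flatten_cons, hIH]
                have hK := pv_cut_le limit rest'.length rest' (le_refl _) (cut + cur.length + 2) (cut + cur.length + 2) (le_refl _)
                rw [show cur.reverse ++ '\r' :: '\n' :: rest' = (cur.reverse ++ ['\r', '\n']) ++ rest' from by simp]
                rw [show pvCutAt limit (cut + cur.length + 2) (cut + cur.length + 2) rest' - cut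
                      = (cur.reverse ++ ['\r', '\n']).length + (pvCutAt limit (cut + cur.length + 2) (cut + cur.length + 2) rest' - (cut + cur.length + 2)) from by
                    simp; omega]
                rw [List.take_append]
                simp [List.take_of_length_le]
              · exfalso; simp at hA hB; omega
            · -- "\r" followed by a non-'\n' character: line is cur ++ "\r"
              rw [show pvSplitKeepAux cur ('\r' :: c2 :: rest') = (cur.reverse ++ ['\r']) :: pvSplitKeepAux [] (c2 :: rest') from by
                  simp [pvSplitKeepAux, h2]]
              rw [show pvCutAt limit (cut + cur.length) cut ('\r' :: c2 :: rest')
                    = if ((cut + cur.length + 1 : Nat) : Int) ≤ limit then pvCutAt limit (cut + cur.length + 1) (cut + cur.length + 1) (c2 :: rest') else cut from by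
                  simp [pvCutAt, h2]]
              simp only [pvTakeLines]
              split_ifs with hA hB hB
              · exfalso; simp at hA hB; omega
              · simp
              · have hIH := ih (c2 :: rest') [] (cut + cur.length + 1) (by simp at hle ⊢; omega)
                  (by simp at hlim ⊢; omega)
                simp only [List.length_nil, Nat.add_zero, List.reverse_nil, List.nil_append] at hIH
                rw [show ((cut : Int) + ((cur.reverse ++ ['\r']).length : Int)) = ((cut + cur.length + 1 : Nat) : Int) from by
                    simp; omega]
                rw [List.flatten_cons, hIH]
                have hK := pv_cut_le limit (c2 :: rest').length (c2 :: rest') (le_refl _) (cut + cur.length + 1) (cut + cur.length + 1) (le_refl _)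
                rw [show cur.reverse ++ '\r' :: c2 :: rest' = (cur.reverse ++ ['\r']) ++ (c2 :: rest') from by simp]
                rw [show pvCutAt limit (cut + cur.length + 1) (cut + cur.length + 1) (c2 :: rest') - cut
                      = (cur.reverse ++ ['\r']).length + (pvCutAt limit (cut + cur.length + 1) (cut + cur.length + 1) (c2 :: rest') - (cut + cur.length + 1)) from by
                    simp; omega]
                rw [List.take_append]
                simp [List.take_of_length_le]
              · exfalso; simp at hA hB; omega
        · -- ordinary character: it joins the current line
          rw [show pvSplitKeepAux cur (c :: rest) = pvSplitKeepAux (c :: cur) rest from by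
              simp [pvSplitKeepAux, hr]]
          rw [show pvCutAt limit (cut + cur.length) cut (c :: rest) = pvCutAt limit (cut + cur.length + 1) cut rest from by
              simp [pvCutAt, hr]]
          have hIH := ih rest (c :: cur) cut (by simpa using hle)
            (by simp at hlim ⊢; omega)
          simp only [List.length_cons, List.reverse_cons, List.append_assoc, List.singleton_append] at hIH
          rw [show cut + cur.length + 1 = cut + (cur.length + 1) from by omega]
          exact hIH

-- ===== VERDICT (by name: the statement is the Claim_ definition above) =====
theorem trim_context_to_limit_spec : Claim_equal_trim_context_to_limit := by
  intro context char_limit _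
  unfold Spec_trim_context_to_limit trim_context_to_limit trim_context_to_limit_alt
  split_ifs with h
  · rfl
  · have hlen : char_limit < ((0 + ([] : List Char).length + context.toList.length : Nat) : Int) := by
      simp only [PySem.Str.len_eq] at h; push_cast; omega
    have hmain := pv_main char_limit context.toList.length context.toList [] 0 (le_refl _) hlen
    simp only [List.length_nil, Nat.add_zero, List.reverse_nil, List.nil_append,
      Nat.sub_zero, Nat.cast_zero] at hmain
    rw [pv_join_nil_flatten, hmain]
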